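-- pv_equiv track=rewrite | github.com/Perps12-oss/silver-octo-pancake | cerebro/v2/ui/results_page.py | _col_x_widths
-- ===== SOURCE A (Python) =====
-- COLS = [("☐", 28), ("Name", 260), ("Size", 88), ("Date", 110), ("Folder", 0)]
--
-- def _col_x_widths(total_w: int):
--     """Return list of (name, x_start, width) for all columns."""
--     flex_w = max(0, total_w - sum(w for _, w in COLS if w > 0))
--     result, x = [], 0
--     for name, w in COLS:
--         cw = w if w > 0 else flex_w
--         result.append((name, x, cw))
--         x += cw
--     return result
-- ===== SOURCE B (Python) =====
-- COLS = [("☐", 28), ("Name", 260), ("Size", 88), ("Date", 110), ("Folder", 0)]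
--
-- def _col_x_widths(total_w: int):
--     """Return list of (name, x_start, width) for all columns."""
--     flex_w = max(0, total_w - sum(w for _, w in COLS if w > 0))
--     widths = [w if w > 0 else flex_w for _, w in COLS]
--     xs = [sum(widths[:i]) for i in range(len(COLS))]
--     return [(name, x, cw) for (name, _), x, cw in zip(COLS, xs, widths)]
-- ===== Notes on version B (the rewrite author's own statement) =====
-- stated objective: idiomatic
-- what changed: Replaced the single loop interleaving the (result, x) accumulator with three separate passes: a comprehension resolving widths, exclusive prefix sums of those widths, and a zip combining names, x-starts and widths.
import Mathlib
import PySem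

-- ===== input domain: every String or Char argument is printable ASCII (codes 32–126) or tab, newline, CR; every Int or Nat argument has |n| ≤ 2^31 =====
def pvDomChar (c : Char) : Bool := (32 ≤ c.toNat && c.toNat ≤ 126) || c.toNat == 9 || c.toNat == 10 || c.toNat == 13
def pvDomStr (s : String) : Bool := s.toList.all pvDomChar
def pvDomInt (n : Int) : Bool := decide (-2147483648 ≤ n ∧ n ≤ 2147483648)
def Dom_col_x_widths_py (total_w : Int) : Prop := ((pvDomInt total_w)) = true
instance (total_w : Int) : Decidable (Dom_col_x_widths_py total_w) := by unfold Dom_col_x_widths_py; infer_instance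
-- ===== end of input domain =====

-- B replaces the interleaved (result, x) accumulator loop with three passes: resolve widths, exclusive prefix sums, zip (idiomatic decomposition, same cost).


-- ===== PORT A =====
def pvCols : List (String × Int) := [("☐", 28), ("Name", 260), ("Size", 88), ("Date", 110), ("Folder", 0)]

-- Port of A: single loop carrying (result, x) accumulator.
def col_x_widths_py (total_w : Int) : List (String × Int × Int) :=
  let flex_w : Int := max 0 (total_w - (((pvCols.filter (fun p => p.2 > 0)).map Prod.snd).sum))
  let st := pvCols.foldl (fun (acc : List (String × Int × Int) × Int) nw =>
    let cw := if nw.2 > 0 then nw.2 else flex_w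
    (acc.1 ++ [(nw.1, acc.2, cw)], acc.2 + cw)) ([], 0)
  st.1

-- ===== PORT B =====
-- Port of B: resolve widths, exclusive prefix sums via slice sums, then zip.
def col_x_widths_py_alt (total_w : Int) : List (String × Int × Int) :=
  let flex_w : Int := max 0 (total_w - (((pvCols.filter (fun p => p.2 > 0)).map Prod.snd).sum))
  let widths : List Int := pvCols.map (fun p => if p.2 > 0 then p.2 else flex_w)
  let xs : List Int := (List.range pvCols.length).map (fun i => (widths.take i).sum)
  (pvCols.zip (xs.zip widths)).map (fun t => (t.1.1, t.2.1, t.2.2))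

-- ===== PRECONDITION & SPEC =====
def Spec_col_x_widths_py (total_w : Int) (out : List (String × Int × Int)) : Prop := out = col_x_widths_py_alt total_w
instance (total_w : Int) (out : List (String × Int × Int)) : Decidable (Spec_col_x_widths_py total_w out) := by unfold Spec_col_x_widths_py; infer_instance

-- ===== CLAIM (what is proved, stated in full; the proofs are below) =====
def Claim_equal_col_x_widths_py : Prop := ∀ (total_w : Int), Dom_col_x_widths_py total_w → Spec_col_x_widths_py total_w (col_x_widths_py total_w)

-- ===== LEMMAS AND PROOFS =====

-- ===== VERDICT (by name: the statement is the Claim_ definition above) =====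
theorem col_x_widths_py_spec : Claim_equal_col_x_widths_py := by
  intro total_w _
  unfold Spec_col_x_widths_py col_x_widths_py col_x_widths_py_alt pvCols
  simp [List.range, List.range.loop]
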